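-- pv_equiv track=rewrite | github.com/marykorol98/Lyric2Melody-for-Russian-Lyrics | main.py | block_cnts
-- ===== SOURCE A (Python) =====
-- def block_cnts(lyrics):
--     i = 0
--     cnts = []
--     for lyric in lyrics:
--         if len(lyric) == 0:
--             cnts.append(i)
--             i = 0
--         else:
--             i += 1
--
--     cnts.append(i)
--
--     return cnts
-- ===== SOURCE B (Python) =====
-- def block_cnts(lyrics):
--     empties = [i for i, lyric in enumerate(lyrics) if len(lyric) == 0]
--     bounds = [-1] + empties + [len(lyrics)]
--     return [b - a - 1 for b, a in zip(bounds[1:], bounds)]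
-- ===== Notes on version B (the rewrite author's own statement) =====
-- stated objective: alternative
-- what changed: B replaces A's streaming running-counter loop by collecting the indices of empty strings and emitting the differences of consecutive boundaries (-1, each separator index, len(lyrics)).
import Mathlib
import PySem

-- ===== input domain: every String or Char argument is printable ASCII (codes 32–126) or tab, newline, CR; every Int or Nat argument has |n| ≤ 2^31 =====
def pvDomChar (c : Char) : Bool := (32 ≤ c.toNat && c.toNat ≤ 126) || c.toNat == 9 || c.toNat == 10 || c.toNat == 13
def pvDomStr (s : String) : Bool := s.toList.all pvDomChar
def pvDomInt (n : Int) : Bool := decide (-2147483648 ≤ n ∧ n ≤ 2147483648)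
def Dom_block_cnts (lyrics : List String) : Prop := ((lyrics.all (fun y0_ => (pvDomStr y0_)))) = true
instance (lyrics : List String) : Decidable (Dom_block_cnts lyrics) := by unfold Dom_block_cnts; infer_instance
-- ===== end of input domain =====

-- B replaces A's running counter with separator positions plus gap differences (different decomposition, same O(n) cost).

-- ===== PORT A =====
-- A: stream the list keeping a running counter i, emitting it at each empty string.
def block_cnts (lyrics : List String) : List Int :=
  let st := lyrics.foldl
    (fun (st : Int × List Int) lyric =>
      if PySem.Str.len lyric == 0 then (0, st.2 ++ [st.1]) else (st.1 + 1, st.2))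
    (0, [])
  st.2 ++ [st.1]

-- ===== PORT B =====
-- B: collect the indices of empty strings, bracket them with -1 and len, map consecutive differences.
def block_cnts_alt (lyrics : List String) : List Int :=
  let empties : List Int :=
    ((PySem.List.enumerate lyrics 0).filter (fun p => PySem.Str.len p.2 == 0)).map (fun p => p.1)
  let bounds : List Int := -1 :: (empties ++ [(lyrics.length : Int)])
  (List.zip bounds.tail bounds).map (fun p => p.1 - p.2 - 1)

-- ===== PRECONDITION & SPEC =====
def Spec_block_cnts (lyrics : List String) (out : List Int) : Prop := out = block_cnts_alt lyrics
instance (lyrics : List String) (out : List Int) : Decidable (Spec_block_cnts lyrics out) := by unfold Spec_block_cnts; infer_instance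

-- ===== CLAIM (what is proved, stated in full; the proofs are below) =====
def Claim_equal_block_cnts : Prop := ∀ (lyrics : List String), Dom_block_cnts lyrics → Spec_block_cnts lyrics (block_cnts lyrics)

-- ===== LEMMAS AND PROOFS =====

-- A's loop as a structural recursion (counter i, emitted counts are the cons'd elements).
def goA : List String → Int → List Int
  | [], i => [i]
  | l :: ls, i => if PySem.Str.len l == 0 then i :: goA ls 0 else goA ls (i + 1)

-- indices (from base n) of the empty strings
def emp : List String → Int → List Int
  | [], _ => []
  | l :: ls, n => if PySem.Str.len l == 0 then n :: emp ls (n + 1) else emp ls (n + 1)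

-- gap sizes between consecutive boundaries prev, E…, n
def gaps (prev : Int) : List Int → Int → List Int
  | [], n => [n - prev - 1]
  | e :: es, n => (e - prev - 1) :: gaps e es n

def addFirst (i : Int) : List Int → List Int
  | [] => []
  | x :: xs => (i + x) :: xs

theorem foldlA (ls : List String) : ∀ (i : Int) (acc : List Int),
    (let st := ls.foldl
        (fun (st : Int × List Int) lyric =>
          if PySem.Str.len lyric == 0 then (0, st.2 ++ [st.1]) else (st.1 + 1, st.2))
        (i, acc)
     st.2 ++ [st.1]) = acc ++ goA ls i := by
  induction ls with
  | nil => intro i acc; simp [goA]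
  | cons l ls ih =>
    intro i acc
    by_cases h : l = ""
    · simpa [goA, h] using ih 0 (acc ++ [i])
    · simpa [goA, h] using ih (i + 1) acc

theorem emp_shift (ls : List String) : ∀ (n : Int), emp ls (n + 1) = (emp ls n).map (· + 1) := by
  induction ls with
  | nil => intro n; simp [emp]
  | cons l ls ih =>
    intro n
    by_cases h : l = ""
    · rw [show emp (l :: ls) (n + 1) = (n + 1) :: emp ls (n + 1 + 1) from by simp [emp, h],
        show emp (l :: ls) n = n :: emp ls (n + 1) from by simp [emp, h], ih (n + 1)]
      simp
    · rw [show emp (l :: ls) (n + 1) = emp ls (n + 1 + 1) from by simp [emp, h],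
        show emp (l :: ls) n = emp ls (n + 1) from by simp [emp, h], ih (n + 1)]

theorem gaps_shift (E : List Int) : ∀ (prev n : Int),
    gaps (prev + 1) (E.map (· + 1)) (n + 1) = gaps prev E n := by
  induction E with
  | nil => intro prev n; simp [gaps]
  | cons e es ih =>
    intro prev n
    simp only [List.map_cons, gaps, ih]
    congr 1
    ring

theorem addFirst_addFirst (i j : Int) (X : List Int) :
    addFirst i (addFirst j X) = addFirst (i + j) X := by
  cases X with
  | nil => simp [addFirst]
  | cons x xs => simp [addFirst]; ring

theorem addFirst_zero (X : List Int) : addFirst 0 X = X := by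
  cases X <;> simp [addFirst]

theorem gaps_shift1 (E : List Int) (n : Int) :
    gaps (-1) (E.map (· + 1)) (n + 1) = addFirst 1 (gaps (-1) E n) := by
  cases E with
  | nil => simp [gaps, addFirst]; ring
  | cons e es =>
    simp only [List.map_cons, gaps, addFirst]
    have h : gaps (e + 1) (es.map (· + 1)) (n + 1) = gaps e es n := gaps_shift es e n
    rw [h]
    congr 1
    ring

theorem goA_eq_gaps (ls : List String) : ∀ (i : Int),
    goA ls i = addFirst i (gaps (-1) (emp ls 0) (ls.length : Int)) := by
  induction ls with
  | nil => intro i; simp [goA, emp, gaps, addFirst]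
  | cons l ls ih =>
    intro i
    have hlen : (((l :: ls).length : Nat) : Int) = (ls.length : Int) + 1 := by
      push_cast [List.length_cons]; ring
    by_cases h : l = ""
    · have h1 : goA (l :: ls) i = i :: goA ls 0 := by simp [goA, h]
      have hs : emp ls 1 = (emp ls 0).map (· + 1) := by simpa using emp_shift ls 0
      have he : emp (l :: ls) 0 = 0 :: (emp ls 0).map (· + 1) := by
        simp [emp, h, hs]
      have hg : gaps (-1) (0 :: (emp ls 0).map (· + 1)) ((ls.length : Int) + 1)
          = 0 :: gaps (-1) (emp ls 0) (ls.length : Int) := by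
        simp only [gaps]
        have h2 : gaps (-1 + 1) ((emp ls 0).map (· + 1)) ((ls.length : Int) + 1)
            = gaps (-1) (emp ls 0) (ls.length : Int) := gaps_shift (emp ls 0) (-1) (ls.length : Int)
        simp only [neg_add_cancel] at h2
        rw [show (0 : Int) - -1 - 1 = 0 by ring, h2]
      rw [h1, ih 0, addFirst_zero, he, hlen, hg]
      simp [addFirst]
    · have h1 : goA (l :: ls) i = goA ls (i + 1) := by simp [goA, h]
      have hs : emp ls 1 = (emp ls 0).map (· + 1) := by simpa using emp_shift ls 0
      have he : emp (l :: ls) 0 = (emp ls 0).map (· + 1) := by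
        simp [emp, h, hs]
      rw [h1, ih (i + 1), he, hlen, gaps_shift1, addFirst_addFirst]

theorem enum_filter (ls : List String) : ∀ (n : Int),
    ((PySem.List.enumerate ls n).filter (fun p => PySem.Str.len p.2 == 0)).map (fun p => p.1)
      = emp ls n := by
  induction ls with
  | nil => intro n; simp [PySem.List.enumerate_nil, emp]
  | cons l ls ih =>
    intro n
    by_cases h : l = "" <;> simp [PySem.List.enumerate_cons, emp, h] <;>
      simpa using ih (n + 1)

theorem zip_diffs (E : List Int) : ∀ (prev n : Int),
    (List.zip (E ++ [n]) (prev :: (E ++ [n]))).map (fun p => p.1 - p.2 - 1)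
      = gaps prev E n := by
  induction E with
  | nil => intro prev n; simp [gaps]
  | cons e es ih =>
    intro prev n
    simp only [List.cons_append, List.zip_cons_cons, List.map_cons, gaps]
    rw [ih e n]

theorem alt_eq_gaps (ls : List String) :
    block_cnts_alt ls = gaps (-1) (emp ls 0) (ls.length : Int) := by
  unfold block_cnts_alt
  simp only [List.tail_cons]
  rw [zip_diffs, enum_filter]

-- ===== VERDICT (by name: the statement is the Claim_ definition above) =====
theorem block_cnts_spec : Claim_equal_block_cnts := by
  intro ls _
  unfold Spec_block_cnts
  have hA : block_cnts ls = goA ls 0 := by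
    unfold block_cnts
    simpa using foldlA ls 0 []
  rw [hA, goA_eq_gaps ls 0, addFirst_zero, alt_eq_gaps]
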